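-- pv_equiv track=rewrite | github.com/IT-coach-666/leetcode-public | leetcode_jy/jy_0501_1000/jy_0801_0850/jy_0828.py | uniqueLetterString_v1
-- ===== SOURCE A (Python) =====
-- def uniqueLetterString_v1(s: str) -> int:
--     n = len(s)
--     dp = [[[0, set(), set()] for _ in range(n)] for _ in range(n)]
--
--     for i in range(n):
--         dp[i][i] = [1, set(s[i]), set()]
--
--         for j in range(i+1, n):
--             prev_unique_count = dp[i][j-1][0]
--             prev_unique_letters = dp[i][j-1][1]
--             prev_duplicate_letters = dp[i][j-1][2]
--
--             if s[j] in prev_unique_letters: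
--                 dp[i][j] = [prev_unique_count - 1,
--                             prev_unique_letters - {s[j]},
--                             prev_duplicate_letters | {s[j]}]
--             elif s[j] in prev_duplicate_letters:
--                 dp[i][j] = [prev_unique_count,
--                             prev_unique_letters,
--                             prev_duplicate_letters]
--             else:
--                 dp[i][j] = [prev_unique_count + 1,
--                             prev_unique_letters | {s[j]},
--                             prev_duplicate_letters]
--
--     count = 0
--
--     for i in range(n):
--         for j in range(n):
--             count += dp[i][j][0]
--
--     return count
-- ===== SOURCE B (Python) =====
-- def uniqueLetterString_v1(s: str) -> int:
--     # One forward pass: cur = sum of unique-char counts of all substrings ending at j,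
--     # updated from the last and second-last occurrence of s[j]; res accumulates cur.
--     res = 0
--     cur = 0
--     last1 = {}
--     last2 = {}
--     for j, c in enumerate(s):
--         l1 = last1.get(c, -1)
--         l2 = last2.get(c, -1)
--         cur += (j - l1) - (l1 - l2)
--         res += cur
--         last2[c] = l1
--         last1[c] = j
--     return res
-- ===== Notes on version B (the rewrite author's own statement) =====
-- stated objective: faster
-- what changed: Replaced the O(n^2) table of (count, unique-set, duplicate-set) triples over all substrings by a single O(n) forward sweep that maintains, per character, its last two occurrence indices and a running sum of unique counts over substrings ending at the current position.
import Mathlib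
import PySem

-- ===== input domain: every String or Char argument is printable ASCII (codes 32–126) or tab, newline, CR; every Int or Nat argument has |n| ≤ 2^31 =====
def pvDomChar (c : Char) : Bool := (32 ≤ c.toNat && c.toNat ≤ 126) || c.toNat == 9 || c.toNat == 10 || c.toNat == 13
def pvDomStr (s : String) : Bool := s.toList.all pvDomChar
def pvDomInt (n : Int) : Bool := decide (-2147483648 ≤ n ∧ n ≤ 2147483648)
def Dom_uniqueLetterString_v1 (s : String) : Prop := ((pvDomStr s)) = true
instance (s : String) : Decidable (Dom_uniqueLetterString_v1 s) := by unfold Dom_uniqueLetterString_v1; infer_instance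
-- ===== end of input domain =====

-- B replaces A's O(n^2) substring table of (count, unique-set, duplicate-set) triples by a single
-- forward sweep keeping, per character, the last two occurrence indices (asymptotically faster).

-- ===== PORT A =====
-- the state of one dp cell: [unique_count, unique_letters, duplicate_letters]
abbrev PvStA := Int × PySem.Set Char × PySem.Set Char

def pvE0 : PvStA := (0, PySem.Set.empty, PySem.Set.empty)

-- the three-way branch of A's inner loop
def pvStepA (prev : PvStA) (c : Char) : PvStA :=
  if PySem.Set.contains prev.2.1 c then
    (prev.1 - 1, PySem.Set.diff prev.2.1 [c], PySem.Set.union prev.2.2 [c])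
  else if PySem.Set.contains prev.2.2 c then
    (prev.1, prev.2.1, prev.2.2)
  else
    (prev.1 + 1, PySem.Set.union prev.2.1 [c], prev.2.2)

-- literal transliteration of A; every list index below is the in-range Python index (0 ≤ i,j < n), so getD is exact
def uniqueLetterString_v1 (s : String) : Int :=
  let t := s.toList
  let n := t.length
  let dp0 : List (List PvStA) := List.replicate n (List.replicate n pvE0)
  let dp := (List.range n).foldl (fun dp i =>
      let row0 := (dp.getD i []).set i (1, PySem.Set.ofList [t.getD i ' '], PySem.Set.empty)
      let row := (List.range' (i+1) (n - (i+1))).foldl (fun row j =>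
          row.set j (pvStepA (row.getD (j-1) pvE0) (t.getD j ' '))) row0
      dp.set i row) dp0
  (List.range n).foldl (fun acc i =>
    (List.range n).foldl (fun acc j => acc + ((dp.getD i []).getD j pvE0).1) acc) 0

-- ===== PORT B =====
-- state: (res, cur, last1, last2)
abbrev PvStB := Int × Int × PySem.Dict Char Int × PySem.Dict Char Int

def pvStepB (st : PvStB) (jc : Int × Char) : PvStB :=
  let l1 := st.2.2.1.getD jc.2 (-1)
  let l2 := st.2.2.2.getD jc.2 (-1)
  let cur := st.2.1 + ((jc.1 - l1) - (l1 - l2))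
  (st.1 + cur, cur, st.2.2.1.insert jc.2 jc.1, st.2.2.2.insert jc.2 l1)

def uniqueLetterString_v1_alt (s : String) : Int :=
  ((PySem.List.enumerate s.toList 0).foldl pvStepB (0, 0, PySem.Dict.empty, PySem.Dict.empty)).1

-- ===== PRECONDITION & SPEC =====
def Spec_uniqueLetterString_v1 (s : String) (out : Int) : Prop := out = uniqueLetterString_v1_alt s
instance (s : String) (out : Int) : Decidable (Spec_uniqueLetterString_v1 s out) := by unfold Spec_uniqueLetterString_v1; infer_instance

-- ===== CLAIM (what is proved, stated in full; the proofs are below) =====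
def Claim_equal_uniqueLetterString_v1 : Prop := ∀ (s : String), Dom_uniqueLetterString_v1 s → Spec_uniqueLetterString_v1 s (uniqueLetterString_v1 s)

-- ===== LEMMAS AND PROOFS =====

/-- number of characters occurring exactly once in `w` -/
def pvWinF (w : List Char) : Int := (w.countP (fun c => w.count c == 1) : Int)

/-- sum of `pvWinF` over all suffix windows of `u` (= all substrings ending at the last char) -/
def pvColSum (u : List Char) : Int := ∑ i ∈ Finset.range u.length, pvWinF (u.drop i)

/-- sum of `pvColSum` over all nonempty prefixes of `u` (= A's total) -/
def pvTotSum (u : List Char) : Int := ∑ j ∈ Finset.range u.length, pvColSum (u.take (j+1))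

/-- (last, second-last) occurrence index of `c` in `u` (−1 when absent) -/
def pvLastTwo (u : List Char) (c : Char) : Int × Int :=
  (PySem.List.enumerate u 0).foldl (fun pr jx => if jx.2 = c then (jx.1, pr.1) else pr)
    ((-1 : Int), (-1 : Int))

/-- A's dp row entries for row `i`: entry at column `i+k` -/
def pvRowE (t : List Char) (i : ℕ) : ℕ → PvStA
  | 0 => (1, PySem.Set.ofList [t.getD i ' '], PySem.Set.empty)
  | k+1 => pvStepA (pvRowE t i k) (t.getD (i+k+1) ' ')

/-- the final dp row `i` built by A's inner loop -/
def pvRowFold (t : List Char) (n i : ℕ) : List PvStA :=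
  (List.range' (i+1) (n - (i+1))).foldl (fun row j =>
      row.set j (pvStepA (row.getD (j-1) pvE0) (t.getD j ' ')))
    ((List.replicate n pvE0).set i (1, PySem.Set.ofList [t.getD i ' '], PySem.Set.empty))

lemma pv_count_append_singleton (w : List Char) (x a : Char) :
    List.count a (w ++ [x]) = List.count a w + if a = x then 1 else 0 := by
  rcases eq_or_ne a x with rfl | h
  · simp [List.count_append]
  · have hx : (x == a) = false := beq_eq_false_iff_ne.mpr (Ne.symm h)
    rw [List.count_append, List.count_singleton, hx, if_neg h]
    simp

lemma pv_countP_shift (w : List Char) (p q : Char → Bool) (x : Char)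
    (h : ∀ a, a ≠ x → p a = q a) :
    (w.countP q : Int) + (if p x then (w.count x : Int) else 0)
      = (w.countP p : Int) + (if q x then (w.count x : Int) else 0) := by
  induction w with
  | nil => simp
  | cons a w ih =>
    rcases eq_or_ne a x with rfl | hax
    · simp only [List.countP_cons, List.count_cons_self]
      cases hp : p a <;> cases hq : q a <;> simp [hp, hq] at ih ⊢ <;> push_cast at ih ⊢ <;> omega
    · have hpq := h a hax
      have hax' : (a == x) = false := beq_eq_false_iff_ne.mpr hax
      simp only [List.countP_cons, List.count_cons, hax', hpq]
      cases hq : q a <;> simp [hq] at ih ⊢ <;> push_cast at ih ⊢ <;> omega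

lemma pvWinF_nil : pvWinF [] = 0 := by simp [pvWinF]

lemma pvWinF_append (w : List Char) (x : Char) :
    pvWinF (w ++ [x]) = pvWinF w +
      (if w.count x = 0 then 1 else if w.count x = 1 then -1 else 0) := by
  have key := pv_countP_shift w (fun c => w.count c == 1) (fun c => (w ++ [x]).count c == 1) x
    (by
      intro a hax
      show (List.count a w == 1) = (List.count a (w ++ [x]) == 1)
      rw [pv_count_append_singleton w x a, if_neg hax, Nat.add_zero])
  unfold pvWinF
  rw [List.countP_append]
  have hx1 : List.count x (w ++ [x]) = List.count x w + 1 := by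
    rw [pv_count_append_singleton, if_pos rfl]
  have hsing : (List.countP (fun c => (w ++ [x]).count c == 1) [x] : Int)
      = if w.count x = 0 then 1 else 0 := by
    rw [List.countP_cons, List.countP_nil]
    by_cases h0 : w.count x = 0
    · rw [if_pos h0]
      have : ((w ++ [x]).count x == 1) = true := by
        rw [hx1]; simp [h0]
      rw [this]
      simp
    · rw [if_neg h0]
      have : ((w ++ [x]).count x == 1) = false := by
        rw [hx1]; simp; omega
      rw [this]
      simp
  push_cast
  rw [hsing]
  simp only [hx1] at key
  by_cases h0 : w.count x = 0
  · simp [h0] at key ⊢; omega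
  · by_cases h1 : w.count x = 1 <;> simp [h0, h1] at key ⊢ <;> omega

lemma pvLastTwo_nil (c : Char) : pvLastTwo [] c = (-1, -1) := rfl

lemma pvLastTwo_append (u : List Char) (x c : Char) :
    pvLastTwo (u ++ [x]) c
      = if x = c then ((u.length : Int), (pvLastTwo u c).1) else pvLastTwo u c := by
  simp [pvLastTwo, PySem.List.enumerate_append, List.foldl_append,
    PySem.List.enumerate_cons, PySem.List.enumerate_nil]

lemma pvLastTwo_append_fst (u : List Char) (x c : Char) :
    (pvLastTwo (u ++ [x]) c).1
      = if x = c then (u.length : Int) else (pvLastTwo u c).1 := by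
  rw [pvLastTwo_append]; split_ifs <;> rfl

lemma pvLastTwo_append_snd (u : List Char) (x c : Char) :
    (pvLastTwo (u ++ [x]) c).2
      = if x = c then (pvLastTwo u c).1 else (pvLastTwo u c).2 := by
  rw [pvLastTwo_append]; split_ifs <;> rfl

lemma pvLastTwo_bounds (u : List Char) (c : Char) :
    -1 ≤ (pvLastTwo u c).2 ∧ (pvLastTwo u c).2 ≤ (pvLastTwo u c).1 ∧
      (pvLastTwo u c).1 < (u.length : Int) := by
  induction u using List.reverseRecOn with
  | nil => simp [pvLastTwo_nil]
  | append_singleton u x ih =>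
    obtain ⟨h1, h2, h3⟩ := ih
    have hlen : ((u ++ [x]).length : Int) = (u.length : Int) + 1 := by
      simp [List.length_append]
    rw [pvLastTwo_append_fst, pvLastTwo_append_snd, hlen]
    split_ifs <;> refine ⟨by omega, by omega, by omega⟩

lemma pv_count_drop (u : List Char) (c : Char) (i : ℕ) :
    ((u.drop i).count c = 0 ↔ (pvLastTwo u c).1 < (i : Int)) ∧
    ((u.drop i).count c = 1 ↔
      ((pvLastTwo u c).2 < (i : Int) ∧ (i : Int) ≤ (pvLastTwo u c).1)) := by
  induction u using List.reverseRecOn generalizing i with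
  | nil =>
    simp [pvLastTwo_nil]
    omega
  | append_singleton u x ih =>
    by_cases hle : i ≤ u.length
    · have hdrop : (u ++ [x]).drop i = u.drop i ++ [x] :=
        List.drop_append_of_le_length hle
      have hcnt : List.count c ((u ++ [x]).drop i)
          = List.count c (u.drop i) + if c = x then 1 else 0 := by
        rw [hdrop, pv_count_append_singleton]
      rw [pvLastTwo_append_fst, pvLastTwo_append_snd]
      rcases eq_or_ne x c with rfl | hxc
      · rw [if_pos rfl, if_pos rfl, hcnt, if_pos rfl]
        constructor
        · constructor
          · intro h; omega
          · intro h
            exfalso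
            have : (i : Int) ≤ (u.length : Int) := by omega
            omega
        · constructor
          · intro h
            have h0 : List.count x (u.drop i) = 0 := by omega
            exact ⟨(ih i).1.mp h0, by omega⟩
          · intro h
            have h0 : List.count x (u.drop i) = 0 := (ih i).1.mpr (by omega)
            omega
      · rw [if_neg hxc, if_neg hxc, hcnt, if_neg (fun hh => hxc hh.symm), Nat.add_zero]
        exact ih i
    · have hgt : u.length < i := by omega
      have hdrop : (u ++ [x]).drop i = [] := by
        apply List.drop_eq_nil_of_le
        simp only [List.length_append, List.length_cons, List.length_nil]
        omega
      obtain ⟨hb1, hb2, hb3⟩ := pvLastTwo_bounds (u ++ [x]) c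
      have hlen : ((u ++ [x]).length : Int) = (u.length : Int) + 1 := by
        simp [List.length_append]
      rw [hdrop]
      simp only [List.count_nil]
      constructor
      · constructor
        · intro _; omega
        · intro _; trivial
      · constructor
        · intro h; omega
        · intro h
          exfalso
          omega

lemma pv_sum_indicator (m : ℕ) (l : Int) (hl : -1 ≤ l) :
    (∑ i ∈ Finset.range m, if l < (i : Int) then (1 : Int) else 0)
      = if l < (m : Int) then (m : Int) - 1 - l else 0 := by
  induction m with
  | zero => simp; omega
  | succ m ih =>
    rw [Finset.sum_range_succ, ih]
    push_cast
    split_ifs <;> omega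

lemma pvColSum_append (u : List Char) (c : Char) :
    pvColSum (u ++ [c]) = pvColSum u +
      (((u.length : Int) - (pvLastTwo u c).1) - ((pvLastTwo u c).1 - (pvLastTwo u c).2)) := by
  obtain ⟨hb1, hb2, hb3⟩ := pvLastTwo_bounds u c
  have key : ∀ i ∈ Finset.range (u.length + 1),
      pvWinF ((u ++ [c]).drop i)
        = pvWinF (u.drop i) +
          ((if (pvLastTwo u c).1 < (i : Int) then (2 : Int) else 0)
            - (if (pvLastTwo u c).2 < (i : Int) then (1 : Int) else 0)) := by
    intro i hi
    rw [Finset.mem_range] at hi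
    have hle : i ≤ u.length := by omega
    have hdrop : (u ++ [c]).drop i = u.drop i ++ [c] :=
      List.drop_append_of_le_length hle
    rw [hdrop, pvWinF_append]
    obtain ⟨cd0, cd1⟩ := pv_count_drop u c i
    by_cases h0 : (u.drop i).count c = 0
    · have hL1 := cd0.mp h0
      rw [if_pos h0, if_pos hL1, if_pos (by omega)]
      omega
    · by_cases h1 : (u.drop i).count c = 1
      · obtain ⟨hL2, hL1⟩ := cd1.mp h1
        rw [if_neg h0, if_pos h1, if_neg (by omega), if_pos hL2]
        omega
      · have hL1 : ¬ (pvLastTwo u c).1 < (i : Int) := fun hc => h0 (cd0.mpr hc)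
        have hL2 : ¬ (pvLastTwo u c).2 < (i : Int) := by
          intro hc
          exact h1 (cd1.mpr ⟨hc, by omega⟩)
        rw [if_neg h0, if_neg h1, if_neg hL1, if_neg hL2]
        omega
  unfold pvColSum
  rw [show (u ++ [c]).length = u.length + 1 by simp]
  rw [Finset.sum_congr rfl key, Finset.sum_add_distrib, Finset.sum_sub_distrib]
  have h2 : ∀ i ∈ Finset.range (u.length + 1),
      (if (pvLastTwo u c).1 < (i : Int) then (2 : Int) else 0)
        = 2 * (if (pvLastTwo u c).1 < (i : Int) then (1 : Int) else 0) := by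
    intro i _; split_ifs <;> ring
  rw [Finset.sum_congr rfl h2, ← Finset.mul_sum]
  rw [pv_sum_indicator _ _ (by omega), pv_sum_indicator _ _ (by omega)]
  rw [Finset.sum_range_succ, List.drop_length, pvWinF_nil]
  rw [if_pos (by push_cast; omega), if_pos (by push_cast; omega)]
  push_cast
  omega

lemma pvTotSum_append (u : List Char) (c : Char) :
    pvTotSum (u ++ [c]) = pvTotSum u + pvColSum (u ++ [c]) := by
  unfold pvTotSum
  rw [show (u ++ [c]).length = u.length + 1 by simp]
  rw [Finset.sum_range_succ]
  congr 1
  · apply Finset.sum_congr rfl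
    intro j hj
    rw [Finset.mem_range] at hj
    rw [List.take_append_of_le_length (by omega)]
  · rw [List.take_of_length_le (by simp)]

/-- full invariant of B's loop -/
lemma pvPhiB (u : List Char) :
    (((PySem.List.enumerate u 0).foldl pvStepB (0, 0, PySem.Dict.empty, PySem.Dict.empty)).1
        = pvTotSum u)
    ∧ (((PySem.List.enumerate u 0).foldl pvStepB (0, 0, PySem.Dict.empty, PySem.Dict.empty)).2.1
        = pvColSum u)
    ∧ (∀ c, ((PySem.List.enumerate u 0).foldl pvStepB
          (0, 0, PySem.Dict.empty, PySem.Dict.empty)).2.2.1.getD c (-1) = (pvLastTwo u c).1)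
    ∧ (∀ c, ((PySem.List.enumerate u 0).foldl pvStepB
          (0, 0, PySem.Dict.empty, PySem.Dict.empty)).2.2.2.getD c (-1) = (pvLastTwo u c).2) := by
  induction u using List.reverseRecOn with
  | nil =>
    refine ⟨rfl, rfl, fun c => rfl, fun c => rfl⟩
  | append_singleton u x ih =>
    obtain ⟨ihres, ihcur, ihd1, ihd2⟩ := ih
    have hfold : (PySem.List.enumerate (u ++ [x]) 0).foldl pvStepB
        (0, 0, PySem.Dict.empty, PySem.Dict.empty)
        = pvStepB ((PySem.List.enumerate u 0).foldl pvStepB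
            (0, 0, PySem.Dict.empty, PySem.Dict.empty)) ((u.length : Int), x) := by
      rw [PySem.List.enumerate_append, List.foldl_append]
      simp [PySem.List.enumerate_cons, PySem.List.enumerate_nil]
    rw [hfold]
    set st := (PySem.List.enumerate u 0).foldl pvStepB
      (0, 0, PySem.Dict.empty, PySem.Dict.empty) with hst
    refine ⟨?_, ?_, ?_, ?_⟩
    · show st.1 + (st.2.1 + (((u.length : Int) - st.2.2.1.getD x (-1))
        - (st.2.2.1.getD x (-1) - st.2.2.2.getD x (-1)))) = _
      rw [ihres, ihcur, ihd1, ihd2, pvTotSum_append, pvColSum_append]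
    · show st.2.1 + (((u.length : Int) - st.2.2.1.getD x (-1))
        - (st.2.2.1.getD x (-1) - st.2.2.2.getD x (-1))) = _
      rw [ihcur, ihd1, ihd2, pvColSum_append]
    · intro c
      show (st.2.2.1.insert x ((u.length : Int))).getD c (-1) = _
      rw [PySem.Dict.getD_insert, pvLastTwo_append_fst]
      rcases eq_or_ne c x with rfl | hcx
      · rw [if_pos rfl, if_pos rfl]
      · rw [if_neg hcx, if_neg (fun hh => hcx hh.symm), ihd1]
    · intro c
      show (st.2.2.2.insert x (st.2.2.1.getD x (-1))).getD c (-1) = _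
      rw [PySem.Dict.getD_insert, pvLastTwo_append_snd]
      rcases eq_or_ne c x with rfl | hcx
      · rw [if_pos rfl, if_pos rfl, ihd1]
      · rw [if_neg hcx, if_neg (fun hh => hcx hh.symm), ihd2]

lemma pvB_eq (s : String) : uniqueLetterString_v1_alt s = pvTotSum s.toList := by
  unfold uniqueLetterString_v1_alt
  exact (pvPhiB s.toList).1

/-- the singleton starting window -/
lemma pv_win_single (t : List Char) (i : ℕ) (hi : i < t.length) :
    (t.take (i+1)).drop i = [t.getD i ' '] := by
  have hlen : (t.take i).length = i := by
    rw [List.length_take, Nat.min_eq_left (by omega)]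
  rw [List.take_succ, List.getElem?_eq_getElem hi,
    List.drop_append_of_le_length (by omega),
    List.drop_eq_nil_of_le (by omega)]
  simp [List.getD_eq_getElem?_getD, List.getElem?_eq_getElem hi]

lemma pv_win_step (t : List Char) (i k : ℕ) (h : i + k + 1 < t.length) :
    (t.take (i+k+2)).drop i = (t.take (i+k+1)).drop i ++ [t.getD (i+k+1) ' '] := by
  have hlen : (t.take (i+k+1)).length = i+k+1 := by
    rw [List.length_take, Nat.min_eq_left (by omega)]
  rw [show i+k+2 = (i+k+1)+1 from rfl, List.take_succ, List.getElem?_eq_getElem h,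
    List.drop_append_of_le_length (by omega)]
  simp [List.getD_eq_getElem?_getD, List.getElem?_eq_getElem h]

lemma pv_count_le_one_singleton (a c : Char) : List.count c [a] ≤ 1 := by
  rw [List.count_singleton]; split <;> omega

lemma pvInit_spec (c0 : Char) :
    ((1 : Int) = pvWinF [c0])
    ∧ (∀ a, a ∈ PySem.Set.ofList [c0] ↔ List.count a [c0] = 1)
    ∧ (∀ a, a ∈ (PySem.Set.empty : PySem.Set Char) ↔ 2 ≤ List.count a [c0]) := by
  refine ⟨?_, ?_, ?_⟩
  · unfold pvWinF
    rw [List.countP_cons, List.countP_nil]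
    have : (List.count c0 [c0] == 1) = true := by
      rw [List.count_singleton]; simp
    rw [this]
    simp
  · intro a
    rw [PySem.Set.mem_ofList, List.count_singleton, List.mem_singleton]
    rcases eq_or_ne a c0 with rfl | h
    · simp
    · have : (c0 == a) = false := beq_eq_false_iff_ne.mpr (Ne.symm h)
      rw [this]
      simp [h]
  · intro a
    have := pv_count_le_one_singleton c0 a
    constructor
    · intro h
      exact absurd h (List.not_mem_nil)
    · intro h; omega

lemma pvStepA_spec (e : PvStA) (w : List Char) (c : Char)
    (he1 : e.1 = pvWinF w)
    (he2 : ∀ a, a ∈ e.2.1 ↔ List.count a w = 1)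
    (he3 : ∀ a, a ∈ e.2.2 ↔ 2 ≤ List.count a w) :
    ((pvStepA e c).1 = pvWinF (w ++ [c]))
    ∧ (∀ a, a ∈ (pvStepA e c).2.1 ↔ List.count a (w ++ [c]) = 1)
    ∧ (∀ a, a ∈ (pvStepA e c).2.2 ↔ 2 ≤ List.count a (w ++ [c])) := by
  have hcnt : ∀ a : Char, List.count a (w ++ [c]) = List.count a w + if a = c then 1 else 0 :=
    fun a => pv_count_append_singleton w c a
  by_cases hmu : c ∈ e.2.1
  · have hcu : List.count c w = 1 := (he2 c).mp hmu
    rw [pvStepA, if_pos ((PySem.Set.contains_iff _ _).mpr hmu)]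
    refine ⟨?_, ?_, ?_⟩
    · show e.1 - 1 = _
      rw [pvWinF_append, if_neg (by omega), if_pos hcu, he1]
      ring
    · intro a
      show a ∈ PySem.Set.diff e.2.1 [c] ↔ _
      rw [PySem.Set.mem_diff, hcnt a, he2 a, List.mem_singleton]
      rcases eq_or_ne a c with rfl | hac
      · simp [hcu]
      · simp [hac]
    · intro a
      show a ∈ PySem.Set.union e.2.2 [c] ↔ _
      rw [PySem.Set.mem_union, hcnt a, he3 a, List.mem_singleton]
      rcases eq_or_ne a c with rfl | hac
      · simp [hcu]
      · simp [hac]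
  · by_cases hmd : c ∈ e.2.2
    · have hcd : 2 ≤ List.count c w := (he3 c).mp hmd
      rw [pvStepA, if_neg (by rw [PySem.Set.contains_iff]; exact hmu),
        if_pos ((PySem.Set.contains_iff _ _).mpr hmd)]
      refine ⟨?_, ?_, ?_⟩
      · show e.1 = _
        rw [pvWinF_append, if_neg (by omega), if_neg (by omega), he1]
        ring
      · intro a
        show a ∈ e.2.1 ↔ _
        rw [he2 a, hcnt a]
        rcases eq_or_ne a c with rfl | hac
        · rw [if_pos rfl]; omega
        · rw [if_neg hac]; omega
      · intro a
        show a ∈ e.2.2 ↔ _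
        rw [he3 a, hcnt a]
        rcases eq_or_ne a c with rfl | hac
        · rw [if_pos rfl]; omega
        · rw [if_neg hac]; omega
    · have hc0 : List.count c w = 0 := by
        by_contra hne
        rcases Nat.lt_or_ge (List.count c w) 2 with hlt | hge
        · exact hmu ((he2 c).mpr (by omega))
        · exact hmd ((he3 c).mpr hge)
      rw [pvStepA, if_neg (by rw [PySem.Set.contains_iff]; exact hmu),
        if_neg (by rw [PySem.Set.contains_iff]; exact hmd)]
      refine ⟨?_, ?_, ?_⟩
      · show e.1 + 1 = _
        rw [pvWinF_append, if_pos hc0, he1]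
      · intro a
        show a ∈ PySem.Set.union e.2.1 [c] ↔ _
        rw [PySem.Set.mem_union, hcnt a, he2 a, List.mem_singleton]
        rcases eq_or_ne a c with rfl | hac
        · simp [hc0]
        · simp [hac]
      · intro a
        show a ∈ e.2.2 ↔ _
        rw [he3 a, hcnt a]
        rcases eq_or_ne a c with rfl | hac
        · rw [if_pos rfl]; omega
        · rw [if_neg hac]; omega

/-- invariant of A's dp entries -/
lemma pvRowE_spec (t : List Char) (i : ℕ) :
    ∀ k, i + k < t.length →
      ((pvRowE t i k).1 = pvWinF ((t.take (i+k+1)).drop i)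
      ∧ (∀ a, a ∈ (pvRowE t i k).2.1 ↔ List.count a ((t.take (i+k+1)).drop i) = 1)
      ∧ (∀ a, a ∈ (pvRowE t i k).2.2 ↔ 2 ≤ List.count a ((t.take (i+k+1)).drop i))) := by
  intro k
  induction k with
  | zero =>
    intro hk
    rw [show i + 0 + 1 = i + 1 from rfl, pv_win_single t i (by omega)]
    exact pvInit_spec (t.getD i ' ')
  | succ k ih =>
    intro hk
    obtain ⟨ihc, ihu, ihd⟩ := ih (by omega)
    rw [show i + (k+1) + 1 = i + k + 2 from rfl, pv_win_step t i k (by omega)]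
    exact pvStepA_spec (pvRowE t i k) _ (t.getD (i+k+1) ' ') ihc ihu ihd

lemma pv_getD_set {α : Type} (l : List α) (j p : ℕ) (a d : α) :
    (l.set j a).getD p d = if p = j ∧ j < l.length then a else l.getD p d := by
  rw [List.getD_eq_getElem?_getD, List.getD_eq_getElem?_getD, List.getElem?_set]
  by_cases h1 : j = p
  · subst h1
    by_cases h2 : j < l.length
    · rw [if_pos rfl, if_pos h2, if_pos ⟨rfl, h2⟩]
      rfl
    · rw [if_pos rfl, if_neg h2, if_neg (fun h => h2 h.2),
        List.getElem?_eq_none (by omega)]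
  · rw [if_neg h1, if_neg (fun h => h1 h.1.symm)]

lemma pv_getD_replicate_self {α : Type} (n p : ℕ) (e : α) :
    (List.replicate n e).getD p e = e := by
  rcases Nat.lt_or_ge p n with h | h
  · exact List.getD_replicate _ h
  · rw [List.getD_eq_getElem?_getD, List.getElem?_eq_none (by simpa using h)]
    rfl

/-- characterization of A's inner row fold -/
lemma pvRowFold_spec (t : List Char) (n i : ℕ) (hn : n = t.length) (hi : i < n) :
    ((pvRowFold t n i).length = n)
    ∧ (∀ p : ℕ, (pvRowFold t n i).getD p pvE0
        = if i ≤ p ∧ p < n then pvRowE t i (p - i) else pvE0) := by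
  have main : ∀ m, m ≤ n - (i+1) →
      (((List.range' (i+1) m).foldl (fun row j =>
          row.set j (pvStepA (row.getD (j-1) pvE0) (t.getD j ' ')))
        ((List.replicate n pvE0).set i
          (1, PySem.Set.ofList [t.getD i ' '], PySem.Set.empty))).length = n)
      ∧ (∀ p : ℕ, ((List.range' (i+1) m).foldl (fun row j =>
          row.set j (pvStepA (row.getD (j-1) pvE0) (t.getD j ' ')))
        ((List.replicate n pvE0).set i
          (1, PySem.Set.ofList [t.getD i ' '], PySem.Set.empty))).getD p pvE0
          = if i ≤ p ∧ p ≤ i + m then pvRowE t i (p - i) else pvE0) := by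
    intro m
    induction m with
    | zero =>
      intro _
      simp only [List.range'_zero, List.foldl_nil]
      constructor
      · rw [List.length_set, List.length_replicate]
      · intro p
        rw [pv_getD_set]
        simp only [List.length_replicate]
        rcases eq_or_ne p i with rfl | hpi
        · rw [if_pos ⟨rfl, hi⟩, if_pos ⟨le_refl _, by omega⟩, Nat.sub_self]
          rfl
        · rw [if_neg (fun h => hpi h.1), if_neg (by omega),
            pv_getD_replicate_self]
    | succ m ih =>
      intro hm
      obtain ⟨ihlen, ihgd⟩ := ih (by omega)
      rw [List.range'_concat, List.foldl_append, List.foldl_cons, List.foldl_nil,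
        show i + 1 + 1 * m = i + m + 1 by ring]
      constructor
      · rw [List.length_set, ihlen]
      · intro p
        rw [show i + m + 1 - 1 = i + m from rfl] 
        rw [pv_getD_set, ihlen, ihgd, ihgd,
          if_pos (show i ≤ i + m ∧ i + m ≤ i + m from ⟨by omega, by omega⟩),
          show i + m - i = m by omega]
        rcases eq_or_ne p (i + m + 1) with rfl | hp
        · rw [if_pos ⟨rfl, by omega⟩, if_pos ⟨by omega, by omega⟩,
            show i + m + 1 - i = m + 1 by omega, pvRowE]
        · rw [if_neg (fun h => hp h.1)]
          by_cases hin : i ≤ p ∧ p ≤ i + m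
          · rw [if_pos hin, if_pos ⟨hin.1, by omega⟩]
          · rw [if_neg hin, if_neg (by omega)]
  have hfin := main (n - (i+1)) (le_refl _)
  refine ⟨hfin.1, ?_⟩
  intro p
  unfold pvRowFold
  rw [hfin.2 p]
  by_cases h : i ≤ p ∧ p < n
  · rw [if_pos ⟨h.1, by omega⟩, if_pos h]
  · rw [if_neg (by omega), if_neg h]

/-- characterization of A's outer fold -/
lemma pvDp_spec (t : List Char) (n : ℕ) (hn : n = t.length) :
    ∀ i : ℕ, i < n →
      ((List.range n).foldl (fun dp i =>
        let row0 := (dp.getD i []).set i (1, PySem.Set.ofList [t.getD i ' '], PySem.Set.empty)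
        let row := (List.range' (i+1) (n - (i+1))).foldl (fun row j =>
            row.set j (pvStepA (row.getD (j-1) pvE0) (t.getD j ' '))) row0
        dp.set i row) (List.replicate n (List.replicate n pvE0))).getD i []
      = pvRowFold t n i := by
  have main : ∀ m, m ≤ n →
      (((List.range m).foldl (fun dp i =>
        let row0 := (dp.getD i []).set i (1, PySem.Set.ofList [t.getD i ' '], PySem.Set.empty)
        let row := (List.range' (i+1) (n - (i+1))).foldl (fun row j =>
            row.set j (pvStepA (row.getD (j-1) pvE0) (t.getD j ' '))) row0
        dp.set i row) (List.replicate n (List.replicate n pvE0))).length = n)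
      ∧ (∀ i : ℕ, i < n →
        ((List.range m).foldl (fun dp i =>
          let row0 := (dp.getD i []).set i (1, PySem.Set.ofList [t.getD i ' '], PySem.Set.empty)
          let row := (List.range' (i+1) (n - (i+1))).foldl (fun row j =>
              row.set j (pvStepA (row.getD (j-1) pvE0) (t.getD j ' '))) row0
          dp.set i row) (List.replicate n (List.replicate n pvE0))).getD i []
        = if i < m then pvRowFold t n i else List.replicate n pvE0) := by
    intro m
    induction m with
    | zero =>
      intro _
      constructor
      · simp
      · intro i hi
        simp only [List.range_zero, List.foldl_nil, Nat.not_lt_zero, if_false]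
        rw [List.getD_eq_getElem?_getD,
          List.getElem?_eq_getElem (by simpa using hi :
            i < (List.replicate n (List.replicate n pvE0)).length)]
        simp
    | succ m ih =>
      intro hm
      obtain ⟨ihlen, ihgd⟩ := ih (by omega)
      rw [List.range_succ, List.foldl_append, List.foldl_cons, List.foldl_nil]
      have hmrow := ihgd m (by omega)
      rw [if_neg (by omega)] at hmrow
      constructor
      · rw [List.length_set, ihlen]
      · intro i hi
        rw [pv_getD_set, ihlen]
        rcases eq_or_ne i m with rfl | him
        · rw [if_pos ⟨rfl, by omega⟩, if_pos (by omega), hmrow]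
          rfl
        · rw [if_neg (fun h => him h.1), ihgd i hi]
          rcases Nat.lt_or_ge i m with hlt | hge
          · rw [if_pos hlt, if_pos (by omega)]
          · rw [if_neg (by omega), if_neg (by omega)]
  intro i hi
  have := (main n (le_refl _)).2 i hi
  rw [if_pos hi] at this
  exact this

lemma pv_list_range_sum (n : ℕ) (f : ℕ → Int) :
    ((List.range n).map f).sum = ∑ i ∈ Finset.range n, f i := by
  induction n with
  | zero => simp
  | succ n ih => simp [List.range_succ, Finset.sum_range_succ, ih]

lemma pv_double_fold (n : ℕ) (g : ℕ → ℕ → Int) :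
    (List.range n).foldl (fun acc i => (List.range n).foldl (fun acc j => acc + g i j) acc) 0
      = ∑ i ∈ Finset.range n, ∑ j ∈ Finset.range n, g i j := by
  have h1 : ∀ (a : Int) (i : ℕ), (List.range n).foldl (fun acc j => acc + g i j) a
      = a + ∑ j ∈ Finset.range n, g i j := by
    intro a i
    rw [PySem.List.foldl_add, pv_list_range_sum]
  have h2 := PySem.List.foldl_congr_mem
    (l := List.range n) (init := (0 : Int))
    (f := fun acc i => (List.range n).foldl (fun acc j => acc + g i j) acc)
    (g := fun acc i => acc + ∑ j ∈ Finset.range n, g i j)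
    (fun acc x _ => h1 acc x)
  rw [h2, PySem.List.foldl_add, pv_list_range_sum]
  simp

lemma pv_drop_take_nil (t : List Char) (i j : ℕ) (h : ¬ i ≤ j) :
    (t.take (j+1)).drop i = [] := by
  apply List.drop_eq_nil_of_le
  rw [List.length_take]
  omega

lemma pvA_eq (s : String) :
    uniqueLetterString_v1 s
      = ∑ i ∈ Finset.range s.toList.length, ∑ j ∈ Finset.range s.toList.length,
          pvWinF ((s.toList.take (j+1)).drop i) := by
  show (List.range s.toList.length).foldl (fun acc i =>
      (List.range s.toList.length).foldl (fun acc j => acc +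
        ((((List.range s.toList.length).foldl (fun dp i =>
            let row0 := (dp.getD i []).set i
              (1, PySem.Set.ofList [s.toList.getD i ' '], PySem.Set.empty)
            let row := (List.range' (i+1) (s.toList.length - (i+1))).foldl (fun row j =>
                row.set j (pvStepA (row.getD (j-1) pvE0) (s.toList.getD j ' '))) row0
            dp.set i row)
          (List.replicate s.toList.length (List.replicate s.toList.length pvE0))).getD i
            []).getD j pvE0).1) acc) 0
    = _
  rw [pv_double_fold]
  apply Finset.sum_congr rfl
  intro i hi
  apply Finset.sum_congr rfl
  intro j hj
  rw [Finset.mem_range] at hi hj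
  rw [pvDp_spec s.toList s.toList.length rfl i hi]
  obtain ⟨_, hgd⟩ := pvRowFold_spec s.toList s.toList.length i rfl hi
  rw [hgd j]
  by_cases hij : i ≤ j
  · rw [if_pos ⟨hij, hj⟩]
    have := (pvRowE_spec s.toList i (j - i) (by omega)).1
    rw [show i + (j - i) + 1 = j + 1 by omega] at this
    exact this
  · rw [if_neg (fun h => hij h.1), pv_drop_take_nil s.toList i j hij, pvWinF_nil]
    rfl

lemma pvColSum_take (t : List Char) (j : ℕ) (hj : j < t.length) :
    pvColSum (t.take (j+1)) = ∑ i ∈ Finset.range t.length, pvWinF ((t.take (j+1)).drop i) := by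
  unfold pvColSum
  rw [List.length_take, Nat.min_eq_left (by omega)]
  have hsub : Finset.range (j+1) ⊆ Finset.range t.length := by
    intro x hx
    rw [Finset.mem_range] at hx ⊢
    omega
  refine Finset.sum_subset hsub ?_
  intro i _ hnot
  rw [Finset.mem_range] at hnot
  rw [pv_drop_take_nil t i j (by omega), pvWinF_nil]

lemma pvTot_eq (t : List Char) :
    pvTotSum t = ∑ j ∈ Finset.range t.length, ∑ i ∈ Finset.range t.length,
      pvWinF ((t.take (j+1)).drop i) := by
  unfold pvTotSum
  apply Finset.sum_congr rfl
  intro j hj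
  rw [Finset.mem_range] at hj
  exact pvColSum_take t j hj

-- ===== VERDICT (by name: the statement is the Claim_ definition above) =====
theorem uniqueLetterString_v1_spec : Claim_equal_uniqueLetterString_v1 := by
  intro s _
  unfold Spec_uniqueLetterString_v1
  rw [pvA_eq, pvB_eq, pvTot_eq, Finset.sum_comm]
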